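-- pv_equiv track=rewrite | github.com/Mrsenior12/Optymalizacja-Kombinatoryczna---Projekt | TSP.py | stworz_sciezke_z_ograniczeniem
-- ===== SOURCE A (Python) =====
-- def stworz_sciezke_z_ograniczeniem(liczba_miast,zakazane):
-- #funkcja tworzy domyślną ścierzkę, gdy i będzie podzielne przez 3 i gdy wartość jest na zakazanej pozycji,
-- # zamieniamy jej wartość z następną wartością
--     sciezka = []
--     for i in range(liczba_miast):
--         sciezka.append(i)
--     for i in range(1,liczba_miast):
--         if i%3 == 0 and sciezka[i] in zakazane:
--             pomoc = sciezka[i-1]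
--             sciezka[i-1] = sciezka[i]
--             sciezka[i] = pomoc
--     sciezka.append(sciezka[0])
--     return sciezka
-- ===== SOURCE B (Python) =====
-- def stworz_sciezke_z_ograniczeniem(liczba_miast, zakazane):
--     zak = set(zakazane)
--
--     def val(p):
--         if p % 3 == 0 and p > 0 and p in zak:
--             return p - 1
--         if (p + 1) % 3 == 0 and p + 1 < liczba_miast and (p + 1) in zak:
--             return p + 1
--         return p
--
--     path = [val(p) for p in range(liczba_miast)]
--     path.append(path[0])
--     return path
-- ===== Notes on version B (the rewrite author's own statement) =====
-- stated objective: faster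
-- what changed: B eliminates A's in-place adjacent-swap loop over a mutable list: each final position is computed directly from its neighbours in a single comprehension, with the forbidden values held in a set so membership is O(1) instead of a list scan.
import Mathlib
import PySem

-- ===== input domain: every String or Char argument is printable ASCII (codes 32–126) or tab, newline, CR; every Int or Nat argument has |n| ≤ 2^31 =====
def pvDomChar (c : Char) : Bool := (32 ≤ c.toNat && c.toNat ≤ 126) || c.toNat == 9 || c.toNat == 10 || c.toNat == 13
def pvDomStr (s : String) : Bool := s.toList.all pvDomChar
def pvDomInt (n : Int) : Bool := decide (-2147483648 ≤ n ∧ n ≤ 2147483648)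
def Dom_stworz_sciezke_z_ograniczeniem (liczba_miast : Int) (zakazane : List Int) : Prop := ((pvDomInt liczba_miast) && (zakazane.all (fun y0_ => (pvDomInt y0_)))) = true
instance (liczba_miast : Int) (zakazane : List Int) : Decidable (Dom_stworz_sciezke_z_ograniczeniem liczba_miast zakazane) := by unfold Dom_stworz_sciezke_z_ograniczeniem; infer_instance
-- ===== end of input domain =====

-- B replaces A's in-place adjacent swaps with a direct per-position construction over a set
-- of the forbidden values (objective: faster membership, different decomposition).

-- ===== PORT A =====
-- one iteration of A's second loop: swap sciezka[i-1] and sciezka[i] when i%3==0 and sciezka[i] is forbidden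
def pvStepA (zakazane : List Int) (sciezka : List Int) (i : Int) : List Int :=
  if PySem.Int.mod i 3 = 0 ∧ PySem.List.pyGetD sciezka i 0 ∈ zakazane then
    let pomoc := PySem.List.pyGetD sciezka (i - 1) 0
    let s1 := PySem.List.pySetD sciezka (i - 1) (PySem.List.pyGetD sciezka i 0)
    PySem.List.pySetD s1 i pomoc
  else sciezka

def stworz_sciezke_z_ograniczeniem (liczba_miast : Int) (zakazane : List Int) : List Int :=
  let sciezka := (PySem.List.pyRange 0 liczba_miast 1).foldl (fun acc i => acc ++ [i]) []
  let sciezka := (PySem.List.pyRange 1 liczba_miast 1).foldl (pvStepA zakazane) sciezka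
  match PySem.List.pyGet? sciezka 0 with
  | some h => sciezka ++ [h]          -- sciezka.append(sciezka[0])
  | none => []                        -- IndexError (liczba_miast ≤ 0); excluded by Pre_

-- ===== PORT B =====
-- final value at position p, computed directly from its neighbours
def pvVal (liczba_miast : Int) (zak : PySem.Set Int) (p : Int) : Int :=
  if PySem.Int.mod p 3 = 0 ∧ 0 < p ∧ p ∈ zak then p - 1
  else if PySem.Int.mod (p + 1) 3 = 0 ∧ p + 1 < liczba_miast ∧ (p + 1) ∈ zak then p + 1
  else p

def stworz_sciezke_z_ograniczeniem_alt (liczba_miast : Int) (zakazane : List Int) : List Int :=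
  let zak := PySem.Set.ofList zakazane
  let path := (PySem.List.pyRange 0 liczba_miast 1).map (pvVal liczba_miast zak)
  match PySem.List.pyGet? path 0 with
  | some h => path ++ [h]             -- path.append(path[0])
  | none => []                        -- IndexError (liczba_miast ≤ 0); excluded by Pre_

-- ===== PRECONDITION & SPEC =====
-- Python A raises IndexError (sciezka[0] on an empty list) iff liczba_miast ≤ 0.
def Pre_stworz_sciezke_z_ograniczeniem (liczba_miast : Int) (zakazane : List Int) : Prop :=
  1 ≤ liczba_miast
instance (liczba_miast : Int) (zakazane : List Int) : Decidable (Pre_stworz_sciezke_z_ograniczeniem liczba_miast zakazane) := by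
  unfold Pre_stworz_sciezke_z_ograniczeniem; infer_instance

def pvWitness_stworz_sciezke_z_ograniczeniem : Int × List Int := (7, [3, 6])

def Spec_stworz_sciezke_z_ograniczeniem (liczba_miast : Int) (zakazane : List Int) (out : List Int) : Prop := out = stworz_sciezke_z_ograniczeniem_alt liczba_miast zakazane
instance (liczba_miast : Int) (zakazane : List Int) (out : List Int) : Decidable (Spec_stworz_sciezke_z_ograniczeniem liczba_miast zakazane out) := by unfold Spec_stworz_sciezke_z_ograniczeniem; infer_instance

-- ===== CLAIM (what is proved, stated in full; the proofs are below) =====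
def Claim_equal_stworz_sciezke_z_ograniczeniem : Prop := ∀ (liczba_miast : Int) (zakazane : List Int), Dom_stworz_sciezke_z_ograniczeniem liczba_miast zakazane → Pre_stworz_sciezke_z_ograniczeniem liczba_miast zakazane → Spec_stworz_sciezke_z_ograniczeniem liczba_miast zakazane (stworz_sciezke_z_ograniczeniem liczba_miast zakazane)

-- ===== LEMMAS AND PROOFS =====

lemma pvStepA_length (zak s : List Int) (i : Int) : (pvStepA zak s i).length = s.length := by
  unfold pvStepA
  split_ifs with h
  · simp [PySem.List.length_pySetD]
  · rfl

-- one step only touches indices i-1, i < s.length, so an element appended at the end passes through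
lemma pvStepA_append (zak s : List Int) (y i : Int) (h1 : 1 ≤ i) (h2 : i < (s.length : Int)) :
    pvStepA zak (s ++ [y]) i = pvStepA zak s i ++ [y] := by
  have hget : ∀ (t : List Int) (j : Int), t.length = s.length → 0 ≤ j → j < (s.length : Int) →
      PySem.List.pyGetD (t ++ [y]) j 0 = PySem.List.pyGetD t j 0 := by
    intro t j ht hj0 hj1
    rw [PySem.List.pyGetD_eq_getElem _ _ hj0 (by simp [ht]; omega),
        PySem.List.pyGetD_eq_getElem _ _ hj0 (by omega),
        List.getElem_append_left (by omega)]
  have hset : ∀ (t : List Int) (j : Int) (v : Int), t.length = s.length → 0 ≤ j → j < (s.length : Int) →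
      PySem.List.pySetD (t ++ [y]) j v = PySem.List.pySetD t j v ++ [y] := by
    intro t j v ht hj0 hj1
    rw [PySem.List.pySetD_of_nonneg _ _ hj0, PySem.List.pySetD_of_nonneg _ _ hj0,
        List.set_append_left _ _ (by omega)]
  unfold pvStepA
  rw [hget s i rfl (by omega) h2]
  split_ifs with h
  · simp only []
    rw [hget s (i - 1) rfl (by omega) (by omega),
        hset s (i - 1) _ rfl (by omega) (by omega),
        hset _ i _ (by simp [PySem.List.length_pySetD]) (by omega) h2]
  · rfl

lemma pvFoldl_append (zak : List Int) (is : List Int) (s : List Int) (y : Int)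
    (h : ∀ i ∈ is, 1 ≤ i ∧ i < (s.length : Int)) :
    is.foldl (pvStepA zak) (s ++ [y]) = is.foldl (pvStepA zak) s ++ [y] := by
  induction is generalizing s with
  | nil => rfl
  | cons i is ih =>
    have hi := h i (List.mem_cons_self)
    simp only [List.foldl_cons]
    rw [pvStepA_append zak s y i hi.1 hi.2, ih (pvStepA zak s i)]
    intro j hj
    have := h j (List.mem_cons_of_mem _ hj)
    rwa [pvStepA_length]

-- pvVal with the larger bound agrees with pvVal with the smaller bound below m-1,
-- and everywhere below m when position m is not swapped
lemma pvVal_mono (m : Int) (S : PySem.Set Int) (p : Int) (hp : p + 1 < m) :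
    pvVal (m + 1) S p = pvVal m S p := by
  unfold pvVal
  have h1 : p + 1 < m + 1 := by omega
  simp only [hp, h1, true_and]

lemma pvmod3 (x : Int) : PySem.Int.mod x 3 = x % 3 :=
  PySem.Int.mod_eq_emod_of_pos (by norm_num)

-- the main loop invariant: A's swap loop produces exactly B's per-position values
lemma pvLoop (zak : List Int) (m : Nat) :
    (PySem.List.pyRange 1 (m : Int) 1).foldl (pvStepA zak) (PySem.List.pyRange 0 (m : Int) 1)
      = (PySem.List.pyRange 0 (m : Int) 1).map (pvVal (m : Int) (PySem.Set.ofList zak)) := by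
  induction m with
  | zero => simp [PySem.List.pyRange_one_eq_nil]
  | succ m ih =>
    rcases Nat.eq_zero_or_pos m with hm0 | hmpos
    · subst hm0
      have e1 : PySem.List.pyRange 1 ((1:Nat):Int) 1 = [] :=
        PySem.List.pyRange_one_eq_nil (by norm_num)
      have e0 : PySem.List.pyRange 0 ((1:Nat):Int) 1 = [0] := by
        have := PySem.List.pyRange_one_singleton (a := (0:Int))
        norm_num at this ⊢
        exact this
      rw [e1, e0]
      simp only [List.foldl_nil, List.map_cons, List.map_nil]
      unfold pvVal
      rw [if_neg (by rintro ⟨-, h, -⟩; omega), if_neg (by rintro ⟨h, -, -⟩; rw [pvmod3] at h; omega)]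
    · have hm : (1:Int) ≤ (m:Int) := by exact_mod_cast hmpos
      have hcast : (((m+1 : Nat)):Int) = (m:Int) + 1 := by push_cast; ring
      rw [hcast]
      have r1 : PySem.List.pyRange 1 ((m:Int)+1) 1 = PySem.List.pyRange 1 (m:Int) 1 ++ [(m:Int)] :=
        PySem.List.pyRange_one_succ_right (by omega)
      have r0 : PySem.List.pyRange 0 ((m:Int)+1) 1 = PySem.List.pyRange 0 (m:Int) 1 ++ [(m:Int)] :=
        PySem.List.pyRange_one_succ_right (by omega)
      have hlen0 : (PySem.List.pyRange 0 (m:Int) 1).length = m := by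
        rw [PySem.List.length_pyRange_one]; omega
      rw [r1, r0, List.foldl_append]
      rw [pvFoldl_append zak _ _ (m:Int) (by
        intro i hi
        rw [PySem.List.mem_pyRange_one] at hi
        refine ⟨hi.1, ?_⟩
        rw [hlen0]
        omega)]
      rw [ih]
      simp only [List.foldl_cons, List.foldl_nil]
      set S := PySem.Set.ofList zak with hS
      set L := (PySem.List.pyRange 0 (m:Int) 1).map (pvVal (m:Int) S) with hL
      have hlenL : L.length = m := by rw [hL, List.length_map, hlen0]
      have hgetM : PySem.List.pyGetD (L ++ [(m:Int)]) (m:Int) 0 = (m:Int) := by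
        rw [PySem.List.pyGetD_eq_getElem _ _ (by omega) (by simp only [List.length_append, List.length_cons, List.length_nil, hlenL]; omega)]
        rw [List.getElem_append_right (by omega)]
        simp [hlenL]
      unfold pvStepA
      rw [hgetM]
      by_cases hc : PySem.Int.mod (m:Int) 3 = 0 ∧ (m:Int) ∈ zak
      · -- swap at position m
        rw [if_pos hc]
        have hmemS : (m:Int) ∈ S := (PySem.Set.mem_ofList zak (m:Int)).mpr hc.2
        have hvalPrev : pvVal (m:Int) S ((m:Int)-1) = (m:Int) - 1 := by
          unfold pvVal
          rw [if_neg (by rintro ⟨h1, -, -⟩; rw [pvmod3] at h1; rw [pvmod3] at hc; omega),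
              if_neg (by rintro ⟨-, h2, -⟩; omega)]
        have hgetPrev : PySem.List.pyGetD (L ++ [(m:Int)]) ((m:Int)-1) 0 = (m:Int) - 1 := by
          rw [PySem.List.pyGetD_eq_getElem _ _ (by omega) (by simp only [List.length_append, List.length_cons, List.length_nil, hlenL]; omega)]
          rw [List.getElem_append_left (by omega : ((m:Int)-1).toNat < L.length)]
          simp only [hL, List.getElem_map]
          rw [PySem.List.getElem_pyRange_one]
          rw [show (0:Int) + ((((m:Int)-1).toNat : Nat) : Int) = (m:Int) - 1 by omega]
          exact hvalPrev
        rw [hgetPrev]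
        rw [PySem.List.pySetD_of_nonneg _ _ (by omega : (0:Int) ≤ (m:Int) - 1)]
        rw [List.set_append_left _ _ (by omega : ((m:Int)-1).toNat < L.length)]
        rw [PySem.List.pySetD_of_nonneg _ _ (by omega : (0:Int) ≤ (m:Int))]
        have hlenset : (L.set ((m:Int)-1).toNat (m:Int)).length = m := by simp [hlenL]
        rw [show (L.set ((m:Int)-1).toNat (m:Int) ++ [(m:Int)]).set (m:Int).toNat ((m:Int)-1)
              = L.set ((m:Int)-1).toNat (m:Int) ++ [(m:Int)-1] by
          conv_lhs => rw [show (m:Int).toNat = (L.set ((m:Int)-1).toNat (m:Int)).length by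
            rw [hlenset]; omega]
          rw [List.set_append_right _ _ (le_refl _)]
          simp]
        rw [List.map_append]
        have hvalM : pvVal ((m:Int)+1) S (m:Int) = (m:Int) - 1 := by
          unfold pvVal
          rw [if_pos ⟨hc.1, by omega, hmemS⟩]
        rw [show List.map (pvVal ((m:Int)+1) S) [(m:Int)] = [(m:Int)-1] by
          simp [hvalM]]
        -- remains: L.set (m-1) m ++ [m-1] = map (pvVal (m+1) S) R0m ++ [m-1]
        congr 1
        -- split the range at m-1
        have r0' : PySem.List.pyRange 0 (m:Int) 1
            = PySem.List.pyRange 0 ((m:Int)-1) 1 ++ [(m:Int)-1] := by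
          have h := PySem.List.pyRange_one_succ_right (a := (0:Int)) (b := (m:Int)-1) (by omega)
          rw [sub_add_cancel] at h
          exact h
        have hlenR' : (PySem.List.pyRange 0 ((m:Int)-1) 1).length = m - 1 := by
          rw [PySem.List.length_pyRange_one]; omega
        rw [hL, r0', List.map_append, List.map_append]
        have hsetidx : ((m:Int)-1).toNat = ((PySem.List.pyRange 0 ((m:Int)-1) 1).map (pvVal (m:Int) S)).length := by
          simp only [List.length_map, hlenR']; omega
        rw [hsetidx, List.set_append_right _ _ (le_refl _)]
        simp only [Nat.sub_self]
        have hvalPrev' : pvVal ((m:Int)+1) S ((m:Int)-1) = (m:Int) := by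
          unfold pvVal
          rw [show (m:Int) - 1 + 1 = (m:Int) from by ring]
          rw [if_neg (by rintro ⟨h1, -, -⟩; rw [pvmod3] at h1; rw [pvmod3] at hc; omega),
              if_pos ⟨hc.1, by omega, hmemS⟩]
        have hcongr : List.map (pvVal ((m:Int)+1) S) (PySem.List.pyRange 0 ((m:Int)-1) 1)
            = List.map (pvVal (m:Int) S) (PySem.List.pyRange 0 ((m:Int)-1) 1) := by
          apply List.map_congr_left
          intro p hp
          rw [PySem.List.mem_pyRange_one] at hp
          exact pvVal_mono (m:Int) S p (by omega)
        rw [hcongr]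
        simp only [List.map_cons, List.map_nil, List.set_cons_zero]
        rw [hvalPrev']
      · -- no swap at position m
        rw [if_neg hc]
        rw [List.map_append]
        have hvalM : pvVal ((m:Int)+1) S (m:Int) = (m:Int) := by
          unfold pvVal
          rw [if_neg (by rintro ⟨h1, -, h3⟩; exact hc ⟨h1, (PySem.Set.mem_ofList zak (m:Int)).mp h3⟩),
              if_neg (by rintro ⟨-, h2, -⟩; omega)]
        rw [show List.map (pvVal ((m:Int)+1) S) [(m:Int)] = [(m:Int)] by simp [hvalM]]
        congr 1
        rw [hL]
        apply (List.map_congr_left _).symm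
        intro p hp
        rw [PySem.List.mem_pyRange_one] at hp
        rcases lt_or_eq_of_le (by omega : p + 1 ≤ (m:Int)) with hlt | heq
        · exact pvVal_mono (m:Int) S p hlt
        · -- p = m - 1 and position m is not swapped: both reduce to the first branch
          have hc2 : ¬(PySem.Int.mod (p+1) 3 = 0 ∧ p + 1 < (m:Int) + 1 ∧ (p+1) ∈ S) := by
            rintro ⟨h1, -, h3⟩
            rw [heq] at h1 h3
            exact hc ⟨h1, (PySem.Set.mem_ofList zak (m:Int)).mp h3⟩
          have hc2' : ¬(PySem.Int.mod (p+1) 3 = 0 ∧ p + 1 < (m:Int) ∧ (p+1) ∈ S) := by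
            rintro ⟨-, h2, -⟩; omega
          unfold pvVal
          by_cases hf : PySem.Int.mod p 3 = 0 ∧ 0 < p ∧ p ∈ S
          · rw [if_pos hf, if_pos hf]
          · rw [if_neg hf, if_neg hf, if_neg hc2, if_neg hc2']

-- ===== VERDICT (by name: the statement is the Claim_ definition above) =====
theorem stworz_sciezke_z_ograniczeniem_spec : Claim_equal_stworz_sciezke_z_ograniczeniem := by
  intro n zak _ hpre
  unfold Spec_stworz_sciezke_z_ograniczeniem
  unfold Pre_stworz_sciezke_z_ograniczeniem at hpre
  unfold stworz_sciezke_z_ograniczeniem stworz_sciezke_z_ograniczeniem_alt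
  have hinit : (PySem.List.pyRange 0 n 1).foldl (fun acc i => acc ++ [i]) []
      = PySem.List.pyRange 0 n 1 := by
    simpa using PySem.List.foldl_append_singleton (PySem.List.pyRange 0 n 1) ([] : List Int)
  have hn : n = ((n.toNat : Nat) : Int) := by omega
  rw [hinit, hn]
  show (match PySem.List.pyGet? ((PySem.List.pyRange 1 ((n.toNat : Nat) : Int) 1).foldl (pvStepA zak)
          (PySem.List.pyRange 0 ((n.toNat : Nat) : Int) 1)) 0 with
        | some h => (PySem.List.pyRange 1 ((n.toNat : Nat) : Int) 1).foldl (pvStepA zak)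
            (PySem.List.pyRange 0 ((n.toNat : Nat) : Int) 1) ++ [h]
        | none => ([] : List Int))
      = (match PySem.List.pyGet? ((PySem.List.pyRange 0 ((n.toNat : Nat) : Int) 1).map
          (pvVal ((n.toNat : Nat) : Int) (PySem.Set.ofList zak))) 0 with
        | some h => (PySem.List.pyRange 0 ((n.toNat : Nat) : Int) 1).map
            (pvVal ((n.toNat : Nat) : Int) (PySem.Set.ofList zak)) ++ [h]
        | none => ([] : List Int))
  rw [pvLoop zak n.toNat]
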